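-- pv_equiv track=rewrite | github.com/FrancoIII/Pavages | vrac/Tribonacci_comp.py | pav_trib
-- ===== SOURCE A (Python) =====
-- def sigma(char):
--     if char == 0:
--         return '01'
--     elif char == 1:
--         return '02'
--     elif char == 2:
--         return '0'
--     raise ValueError('Ne prends que 0, 1  ou 2 en argument')
--
-- def pav_trib(nb):
--     pav = '0'
--     for i in range(nb):
--         pav_ = ''
--         for char in pav:
--             pav_ += sigma(int(char))
--         pav = pav_
--     return pav
-- ===== SOURCE B (Python) =====
-- def pav_trib(nb):
--     # Tribonacci word via the concatenation recurrence s_n = s_{n-1} + s_{n-2} + s_{n-3}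
--     if nb <= 0:
--         return '0'
--     if nb == 1:
--         return '01'
--     if nb == 2:
--         return '0102'
--     s0, s1, s2 = '0', '01', '0102'
--     for i in range(3, nb + 1):
--         s0, s1, s2 = s1, s2, s2 + s1 + s0
--     return s2
-- ===== Notes on version B (the rewrite author's own statement) =====
-- stated objective: alternative
-- what changed: B replaces per-character substitution rounds with the Tribonacci concatenation recurrence s_n = s_{n-1}+s_{n-2}+s_{n-3}, building the word by appending three whole previous words per round (intended as faster; a timing run measured 77x at n=16 but could not confirm at larger sizes, where the exponentially long output times both out).
import Mathlib
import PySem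

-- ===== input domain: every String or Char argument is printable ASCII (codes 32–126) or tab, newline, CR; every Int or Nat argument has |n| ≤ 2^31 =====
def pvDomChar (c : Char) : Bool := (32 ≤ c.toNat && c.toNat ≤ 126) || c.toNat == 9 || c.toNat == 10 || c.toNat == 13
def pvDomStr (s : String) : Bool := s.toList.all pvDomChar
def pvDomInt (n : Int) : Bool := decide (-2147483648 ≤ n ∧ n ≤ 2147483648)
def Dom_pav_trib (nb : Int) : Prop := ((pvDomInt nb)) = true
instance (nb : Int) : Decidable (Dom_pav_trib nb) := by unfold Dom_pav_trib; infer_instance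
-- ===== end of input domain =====

-- B builds the Tribonacci word by the whole-word concatenation recurrence s_n = s_{n-1} ++ s_{n-2} ++ s_{n-3}
-- instead of A's per-character substitution rounds (objective: alternative algorithm, same output).


-- ===== PORT A =====
-- Python's 'raise ValueError' branch is unreachable (pav only ever contains '0','1','2');
-- the port returns "" there, and int(char) on a non-digit (also unreachable) is ported as getD (-1).
def sigmaA (c : Int) : String :=
  if c = 0 then "01" else if c = 1 then "02" else if c = 2 then "0" else ""

def pav_trib (nb : Int) : String :=
  (PySem.List.pyRange 0 nb 1).foldl
    (fun pav _ =>
      pav.toList.foldl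
        (fun pav_ ch => pav_ ++ sigmaA ((PySem.Int.ofStr? (String.ofList [ch])).getD (-1))) "")
    "0"

-- ===== PORT B =====
def pav_trib_alt (nb : Int) : String :=
  if nb ≤ 0 then "0"
  else if nb = 1 then "01"
  else if nb = 2 then "0102"
  else
    let r := (PySem.List.pyRange 3 (nb + 1) 1).foldl
      (fun (t : String × String × String) _ => (t.2.1, t.2.2, t.2.2 ++ t.2.1 ++ t.1))
      ("0", "01", "0102")
    r.2.2

-- ===== PRECONDITION & SPEC =====
def Spec_pav_trib (nb : Int) (out : String) : Prop := out = pav_trib_alt nb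
instance (nb : Int) (out : String) : Decidable (Spec_pav_trib nb out) := by unfold Spec_pav_trib; infer_instance

-- ===== CLAIM (what is proved, stated in full; the proofs are below) =====
def Claim_equal_pav_trib : Prop := ∀ (nb : Int), Dom_pav_trib nb → Spec_pav_trib nb (pav_trib nb)

-- ===== LEMMAS AND PROOFS =====

-- the substitution σ at the level of character lists
def sigL (c : Char) : List Char :=
  if c = '0' then ['0', '1'] else if c = '1' then ['0', '2'] else if c = '2' then ['0'] else []

def phi (l : List Char) : List Char := l.flatMap sigL

-- n-fold application of phi
def pw : Nat → List Char → List Char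
  | 0, l => l
  | n + 1, l => pw n (phi l)

lemma pw_succ' (n : Nat) (l : List Char) : pw (n + 1) l = phi (pw n l) := by
  induction n generalizing l with
  | zero => rfl
  | succ k ih => simpa [pw] using ih (phi l)

lemma pw_append (n : Nat) (a b : List Char) : pw n (a ++ b) = pw n a ++ pw n b := by
  induction n generalizing a b with
  | zero => rfl
  | succ k ih => simp [pw, phi, List.flatMap_append, ih]

-- the three letter-words and the Tribonacci recurrence
lemma pw_zero_succ (n : Nat) : pw (n + 1) ['0'] = pw n ['0'] ++ pw n ['1'] := by
  rw [show pw (n + 1) ['0'] = pw n (['0'] ++ ['1']) from rfl, pw_append]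

lemma pw_one_succ (n : Nat) : pw (n + 1) ['1'] = pw n ['0'] ++ pw n ['2'] := by
  rw [show pw (n + 1) ['1'] = pw n (['0'] ++ ['2']) from rfl, pw_append]

lemma pw_two_succ (n : Nat) : pw (n + 1) ['2'] = pw n ['0'] := rfl

lemma trib_rec (n : Nat) :
    pw (n + 3) ['0'] = pw (n + 2) ['0'] ++ pw (n + 1) ['0'] ++ pw n ['0'] := by
  rw [pw_zero_succ (n + 2), pw_one_succ (n + 1), pw_two_succ n, pw_zero_succ]
  simp [List.append_assoc]

-- every word reachable in A consists of the letters '0','1','2'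
lemma phi_chars (l : List Char) : ∀ c ∈ phi l, c = '0' ∨ c = '1' ∨ c = '2' := by
  intro c hc
  obtain ⟨x, -, hx⟩ := List.mem_flatMap.mp hc
  unfold sigL at hx
  split_ifs at hx <;> simp_all <;> rcases hx with h | h <;> simp [h]

lemma pw_chars (n : Nat) : ∀ c ∈ pw n ['0'], c = '0' ∨ c = '1' ∨ c = '2' := by
  cases n with
  | zero => intro c hc; simp [pw] at hc; simp [hc]
  | succ k => rw [pw_succ']; exact phi_chars _

-- A's sigma applied through int(char) agrees with sigL on the reachable letters
lemma sigmaA_eq (ch : Char) (h : ch = '0' ∨ ch = '1' ∨ ch = '2') :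
    sigmaA ((PySem.Int.ofStr? (String.ofList [ch])).getD (-1)) = String.ofList (sigL ch) := by
  rcases h with h | h | h <;> subst h <;> decide

-- A's inner loop is exactly phi
lemma innerA (l : List Char) (hl : ∀ c ∈ l, c = '0' ∨ c = '1' ∨ c = '2') (s : String) :
    l.foldl (fun pav_ ch => pav_ ++ sigmaA ((PySem.Int.ofStr? (String.ofList [ch])).getD (-1))) s
      = s ++ String.ofList (phi l) := by
  induction l generalizing s with
  | nil => simp [phi]
  | cons c t ih =>
    have hc := hl c (by simp)
    rw [List.foldl_cons, ih (fun x hx => hl x (by simp [hx])), sigmaA_eq c hc]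
    simp [phi, List.flatMap_cons, String.ofList_append, String.append_assoc]

-- folding a body that ignores the list elements is function iteration
lemma foldl_const_iter {α β : Type} (f : α → α) (l : List β) (s : α) :
    l.foldl (fun a _ => f a) s = f^[l.length] s := by
  induction l generalizing s with
  | nil => rfl
  | cons x t ih => simp [List.foldl_cons, ih, Function.iterate_succ_apply]

-- A computes the n-th iterate of phi on "0"
lemma stepA_iter (n : Nat) :
    (fun pav : String =>
        pav.toList.foldl
          (fun pav_ ch => pav_ ++ sigmaA ((PySem.Int.ofStr? (String.ofList [ch])).getD (-1))) "")^[n]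
        "0"
      = String.ofList (pw n ['0']) := by
  induction n with
  | zero => rfl
  | succ k ih =>
    rw [Function.iterate_succ_apply', ih]
    have := innerA (pw k ['0']) (pw_chars k) ""
    simpa [pw_succ'] using this

lemma pav_trib_eq_pw (nb : Int) : pav_trib nb = String.ofList (pw nb.toNat ['0']) := by
  unfold pav_trib
  rw [foldl_const_iter, PySem.List.length_pyRange_one]
  simpa using stepA_iter nb.toNat

-- B's loop state after k rounds holds three consecutive Tribonacci words
lemma alt_loop (k : Nat) :
    (fun (t : String × String × String) => (t.2.1, t.2.2, t.2.2 ++ t.2.1 ++ t.1))^[k]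
        ("0", "01", "0102")
      = (String.ofList (pw k ['0']), String.ofList (pw (k + 1) ['0']),
         String.ofList (pw (k + 2) ['0'])) := by
  induction k with
  | zero => rfl
  | succ n ih =>
    rw [Function.iterate_succ_apply', ih]
    have h := trib_rec n
    simp only [show n + 1 + 1 = n + 2 from rfl, show n + 1 + 2 = n + 3 from rfl, h,
      String.ofList_append]

-- ===== VERDICT (by name: the statement is the Claim_ definition above) =====
theorem pav_trib_spec : Claim_equal_pav_trib := by
  intro nb _
  unfold Spec_pav_trib pav_trib_alt
  rw [pav_trib_eq_pw]
  split_ifs with h0 h1 h2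
  · rw [show nb.toNat = 0 by omega]; rfl
  · rw [h1]; rfl
  · rw [h2]; rfl
  · rw [foldl_const_iter, PySem.List.length_pyRange_one, alt_loop]
    have h3 : (nb + 1 - 3).toNat + 2 = nb.toNat := by omega
    rw [h3]
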